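-- pv_equiv track=rewrite | github.com/waterbear-cloud/paco.models | src/aim/models/references.py | is_ref
-- ===== SOURCE A (Python) =====
-- def is_ref(aim_ref):
--     """Determines if the string value is an AIM Reference"""
--     if aim_ref.startswith('aim.ref ') == False:
--         return False
--     ref_types = ["netenv", "resource", "accounts", "function", "service"]
--     for ref_type in ref_types:
--         if aim_ref.startswith('aim.ref %s.' % ref_type):
--             return True
--     return False
-- ===== SOURCE B (Python) =====
-- def is_ref(aim_ref):
--     """Determines if the string value is an AIM Reference"""
--     if not aim_ref.startswith('aim.ref '):
--         return False
--     head, sep, _ = aim_ref[8:].partition('.')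
--     return sep == '.' and head in {'netenv', 'resource', 'accounts', 'function', 'service'}
-- ===== Notes on version B (the rewrite author's own statement) =====
-- stated objective: simpler
-- what changed: Replaces the five repeated startswith scans over a candidate list with a single parse: slice off the 8-char prefix, partition the remainder at the first dot, and test that a separator was found plus one set membership of the head token.
import Mathlib
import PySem

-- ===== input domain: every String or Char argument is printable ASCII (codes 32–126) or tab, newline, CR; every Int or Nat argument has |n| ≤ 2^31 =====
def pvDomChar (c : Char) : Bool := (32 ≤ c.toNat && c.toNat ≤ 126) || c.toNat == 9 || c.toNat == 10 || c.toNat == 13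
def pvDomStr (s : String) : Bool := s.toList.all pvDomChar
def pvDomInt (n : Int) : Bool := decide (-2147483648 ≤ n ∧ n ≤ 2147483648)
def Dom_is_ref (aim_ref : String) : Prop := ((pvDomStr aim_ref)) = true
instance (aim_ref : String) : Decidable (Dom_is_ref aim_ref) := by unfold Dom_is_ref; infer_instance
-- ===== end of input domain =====

-- B is simpler: one parse (slice off 'aim.ref ', partition at the first dot, one
-- set-membership test of the head token) instead of five repeated startswith scans.

-- ===== PORT A =====
-- 'aim.ref %s.' % ref_type is transliterated as "aim.ref " ++ ref_type ++ "."; the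
-- for-loop with early 'return True' and final 'return False' is List.any in the same order.
def is_ref (aim_ref : String) : Bool :=
  if (PySem.Str.startswith aim_ref "aim.ref " == false) then false
  else
    let ref_types : List String := ["netenv", "resource", "accounts", "function", "service"]
    ref_types.any (fun t => PySem.Str.startswith aim_ref (String.ofList ("aim.ref ".toList ++ t.toList ++ ['.'])))

-- ===== PORT B =====
-- rest.partition('.') is ported by hand (PySem has no partition): head = takeWhile (· ≠ '.'),
-- and sep == '.' iff dropWhile (· ≠ '.') is nonempty — exact for a single-character separator.
def is_ref_alt (aim_ref : String) : Bool :=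
  if PySem.Str.startswith aim_ref "aim.ref " then
    let rest := PySem.List.slice aim_ref.toList (some 8) none
    let head := rest.takeWhile (· ≠ '.')
    let sepFound := rest.dropWhile (· ≠ '.') ≠ []
    sepFound && (["netenv", "resource", "accounts", "function", "service"].map String.toList).contains head
  else false

-- ===== PRECONDITION & SPEC =====
def Spec_is_ref (aim_ref : String) (out : Bool) : Prop := out = is_ref_alt aim_ref
instance (aim_ref : String) (out : Bool) : Decidable (Spec_is_ref aim_ref out) := by unfold Spec_is_ref; infer_instance

-- ===== CLAIM (what is proved, stated in full; the proofs are below) =====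
def Claim_equal_is_ref : Prop := ∀ (aim_ref : String), Dom_is_ref aim_ref → Spec_is_ref aim_ref (is_ref aim_ref)

-- ===== LEMMAS AND PROOFS =====

-- partition at the first '.': for a dot-free token t, "t" ++ "." prefixes cs iff the
-- takeWhile/dropWhile split of cs has head t and found a separator.
lemma part_prefix (t cs : List Char) (ht : '.' ∉ t) :
    (t ++ ['.']) <+: cs ↔ (cs.takeWhile (· ≠ '.') = t ∧ cs.dropWhile (· ≠ '.') ≠ []) := by
  constructor
  · rintro ⟨u, rfl⟩
    have htw : t.takeWhile (fun c => decide (c ≠ '.')) = t :=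
      List.takeWhile_eq_self_iff.mpr (by intro c hc; simp; rintro rfl; exact ht hc)
    have hdw : t.dropWhile (fun c => decide (c ≠ '.')) = [] :=
      List.dropWhile_eq_nil_iff.mpr (by intro c hc; simp; rintro rfl; exact ht hc)
    rw [List.append_assoc]
    refine ⟨?_, ?_⟩
    · rw [List.takeWhile_append, if_pos (by rw [htw])]
      simp
    · rw [List.dropWhile_append, if_pos (by rw [hdw]; rfl)]
      simp
  · rintro ⟨h1, h2⟩
    have hd := List.head_dropWhile_not (fun c => decide (c ≠ '.')) h2
    simp at hd
    refine ⟨(cs.dropWhile (· ≠ '.')).tail, ?_⟩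
    conv_rhs => rw [← List.takeWhile_append_dropWhile (p := fun c => decide (c ≠ '.')) (l := cs)]
    rw [h1, ← List.cons_head_tail h2]
    simp
    have h2' : List.dropWhile (fun x => !decide (x = '.')) cs ≠ [] := by simpa using h2
    conv_rhs => rw [← List.cons_head_tail h2']
    rw [hd]

theorem is_ref_main (s : String) : is_ref s = is_ref_alt s := by
  unfold is_ref is_ref_alt
  by_cases hp : PySem.Str.startswith s "aim.ref " = true
  · obtain ⟨rest, hrest⟩ : "aim.ref ".toList <+: s.toList := by
      rw [PySem.Str.startswith_eq, PySem.Chars.startswith_iff] at hp; exact hp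
    simp only [PySem.Str.startswith_eq]
    rw [← hrest, PySem.List.slice_from _ (by norm_num)]
    have hdrop : List.drop (8:Int).toNat ("aim.ref ".toList ++ rest) = rest := by
      rw [show (8:Int).toNat = "aim.ref ".toList.length from by decide, List.drop_left]
    rw [hdrop]
    have hpre : PySem.Chars.startswith ("aim.ref ".toList ++ rest) "aim.ref ".toList = true :=
      (PySem.Chars.startswith_iff _ _).mpr ⟨rest, rfl⟩
    rw [if_neg (by rw [hpre]; simp), if_pos hpre]
    rw [Bool.eq_iff_iff]
    simp only [List.any_cons, List.any_nil, Bool.or_eq_true, Bool.and_eq_true,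
      List.map_cons, List.map_nil, List.contains_cons, List.contains_nil,
      PySem.Chars.startswith_iff, decide_eq_true_eq, String.toList_ofList,
      List.append_assoc, List.prefix_append_right_inj, beq_iff_eq,
      ne_eq, Bool.false_eq_true, or_false]
    rw [part_prefix _ _ (by decide), part_prefix _ _ (by decide), part_prefix _ _ (by decide),
        part_prefix _ _ (by decide), part_prefix _ _ (by decide)]
    have norm : (fun x : Char => decide (x ≠ '.')) = (fun x => !decide (x = '.')) := by
      funext x; simp
    simp only [norm,
      show "netenv".toList = ['n','e','t','e','n','v'] from by decide,
      show "resource".toList = ['r','e','s','o','u','r','c','e'] from by decide,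
      show "accounts".toList = ['a','c','c','o','u','n','t','s'] from by decide,
      show "function".toList = ['f','u','n','c','t','i','o','n'] from by decide,
      show "service".toList = ['s','e','r','v','i','c','e'] from by decide]
    tauto
  · simp only [Bool.not_eq_true, PySem.Str.startswith_eq] at hp
    have hp' : PySem.Chars.startswith s.toList ['a','i','m','.','r','e','f',' '] = false := hp
    simp [hp']

-- ===== VERDICT (by name: the statement is the Claim_ definition above) =====
theorem is_ref_spec : Claim_equal_is_ref := by
  intro aim_ref _
  exact is_ref_main aim_ref
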